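-- pv_equiv track=rewrite | github.com/hlucianojr1/blender-mcp | src/blender_mcp/scene_templates.py | suggest_template
-- ===== SOURCE A (Python) =====
-- def suggest_template(
--     scene_description: str,
--     object_type: str = None,
--     style: str = None
-- ) -> str:
--     """
--     Suggest appropriate scene template based on description.
--
--     Args:
--         scene_description: Description of desired scene
--         object_type: Type of object (product, character, building, environment)
--         style: Desired style (professional, dramatic, cinematic, clean, etc.)
--
--     Returns:
--         Recommended template key
--     """
--     desc_lower = scene_description.lower()
--
--     # Product templates
--     if any(word in desc_lower for word in ['product', 'ecommerce', 'catalog', 'item']):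
--         if any(word in desc_lower for word in ['lifestyle', 'natural', 'contextual']):
--             return "product_lifestyle"
--         elif any(word in desc_lower for word in ['hero', 'dramatic', 'premium']):
--             return "product_hero_dramatic"
--         else:
--             return "product_studio_pro"
--
--     # Portrait templates
--     elif any(word in desc_lower for word in ['portrait', 'character', 'person', 'face', 'headshot']):
--         if any(word in desc_lower for word in ['noir', 'black and white', 'vintage']):
--             return "portrait_noir"
--         elif any(word in desc_lower for word in ['cinematic', 'dramatic', 'moody', 'artistic']):
--             return "portrait_cinematic"
--         else:
--             return "portrait_professional"
--
--     # Landscape templates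
--     elif any(word in desc_lower for word in ['landscape', 'environment', 'nature', 'outdoor scene']):
--         if any(word in desc_lower for word in ['epic', 'wide', 'dramatic sky']):
--             return "landscape_epic"
--         elif any(word in desc_lower for word in ['moody', 'dark', 'fog', 'night']):
--             return "landscape_moody"
--         else:
--             return "landscape_classic"
--
--     # Architecture templates
--     elif any(word in desc_lower for word in ['architecture', 'building', 'structure', 'interior']):
--         if any(word in desc_lower for word in ['night', 'dramatic night']):
--             return "architecture_dramatic"
--         elif any(word in desc_lower for word in ['technical', 'clean', 'presentation']):
--             return "architecture_technical"
--         else: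
--             return "architecture_hero"
--
--     # Default to product studio
--     return "product_studio_pro"
-- ===== SOURCE B (Python) =====
-- # Two staged passes: first extract the feature set of all vocabulary keywords occurring
-- # in the description, then classify recursively over a rule table by set-disjointness.
--
-- _KEYWORDS = [
--     'product', 'ecommerce', 'catalog', 'item',
--     'lifestyle', 'natural', 'contextual',
--     'hero', 'dramatic', 'premium',
--     'portrait', 'character', 'person', 'face', 'headshot',
--     'noir', 'black and white', 'vintage',
--     'cinematic', 'moody', 'artistic',
--     'landscape', 'environment', 'nature', 'outdoor scene',
--     'epic', 'wide', 'dramatic sky',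
--     'dark', 'fog', 'night',
--     'architecture', 'building', 'structure', 'interior',
--     'dramatic night',
--     'technical', 'clean', 'presentation',
-- ]
--
-- _RULES = [
--     (['product', 'ecommerce', 'catalog', 'item'],
--      [(['lifestyle', 'natural', 'contextual'], 'product_lifestyle'),
--       (['hero', 'dramatic', 'premium'], 'product_hero_dramatic')],
--      'product_studio_pro'),
--     (['portrait', 'character', 'person', 'face', 'headshot'],
--      [(['noir', 'black and white', 'vintage'], 'portrait_noir'),
--       (['cinematic', 'dramatic', 'moody', 'artistic'], 'portrait_cinematic')],
--      'portrait_professional'),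
--     (['landscape', 'environment', 'nature', 'outdoor scene'],
--      [(['epic', 'wide', 'dramatic sky'], 'landscape_epic'),
--       (['moody', 'dark', 'fog', 'night'], 'landscape_moody')],
--      'landscape_classic'),
--     (['architecture', 'building', 'structure', 'interior'],
--      [(['night', 'dramatic night'], 'architecture_dramatic'),
--       (['technical', 'clean', 'presentation'], 'architecture_technical')],
--      'architecture_hero'),
-- ]
--
--
-- def _classify(found, rules):
--     if not rules:
--         return "product_studio_pro"
--     top, subrules, base = rules[0]
--     if found.isdisjoint(top):
--         return _classify(found, rules[1:])
--     for sub, template in subrules: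
--         if not found.isdisjoint(sub):
--             return template
--     return base
--
--
-- def suggest_template(scene_description: str, object_type: str = None, style: str = None) -> str:
--     desc = scene_description.lower()
--     found = {k for k in _KEYWORDS if k in desc}
--     return _classify(found, _RULES)
-- ===== Notes on version B (the rewrite author's own statement) =====
-- stated objective: alternative
-- what changed: B replaces A's lazily evaluated hard-coded if/elif chain of per-list substring searches with two staged passes: one pass over the keyword vocabulary materialises the set of keywords occurring in the description, then a recursive classifier over an ordered rule table decides purely by set-disjointness tests against that feature set.
import Mathlib
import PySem

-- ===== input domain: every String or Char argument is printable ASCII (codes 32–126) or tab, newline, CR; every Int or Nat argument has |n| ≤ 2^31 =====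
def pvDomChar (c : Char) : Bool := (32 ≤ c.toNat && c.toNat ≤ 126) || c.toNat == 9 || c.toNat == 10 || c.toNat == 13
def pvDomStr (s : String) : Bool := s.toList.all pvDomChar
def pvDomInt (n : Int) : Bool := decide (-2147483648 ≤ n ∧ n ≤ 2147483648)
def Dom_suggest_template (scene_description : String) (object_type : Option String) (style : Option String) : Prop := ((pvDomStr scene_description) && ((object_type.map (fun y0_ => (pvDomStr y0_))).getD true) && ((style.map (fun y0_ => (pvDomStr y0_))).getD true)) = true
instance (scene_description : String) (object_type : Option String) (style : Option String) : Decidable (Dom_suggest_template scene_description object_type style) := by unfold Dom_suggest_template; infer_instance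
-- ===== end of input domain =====

-- ===== PORT A =====
-- B splits the work into two staged passes — extract the feature set of all vocabulary
-- keywords occurring in the description, then classify recursively over a rule table by
-- set-disjointness — where A lazily runs per-list substring searches in a hard-coded chain.

-- helper for `any(word in desc for word in [...])`
def pyAnyIn (ws : List String) (desc : String) : Bool := ws.any (fun w => PySem.Str.isIn w desc)

def suggest_template (scene_description : String) (object_type : Option String) (style : Option String) : String :=
  let desc_lower := PySem.Str.lower scene_description
  if pyAnyIn ["product", "ecommerce", "catalog", "item"] desc_lower then
    if pyAnyIn ["lifestyle", "natural", "contextual"] desc_lower then "product_lifestyle"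
    else if pyAnyIn ["hero", "dramatic", "premium"] desc_lower then "product_hero_dramatic"
    else "product_studio_pro"
  else if pyAnyIn ["portrait", "character", "person", "face", "headshot"] desc_lower then
    if pyAnyIn ["noir", "black and white", "vintage"] desc_lower then "portrait_noir"
    else if pyAnyIn ["cinematic", "dramatic", "moody", "artistic"] desc_lower then "portrait_cinematic"
    else "portrait_professional"
  else if pyAnyIn ["landscape", "environment", "nature", "outdoor scene"] desc_lower then
    if pyAnyIn ["epic", "wide", "dramatic sky"] desc_lower then "landscape_epic"
    else if pyAnyIn ["moody", "dark", "fog", "night"] desc_lower then "landscape_moody"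
    else "landscape_classic"
  else if pyAnyIn ["architecture", "building", "structure", "interior"] desc_lower then
    if pyAnyIn ["night", "dramatic night"] desc_lower then "architecture_dramatic"
    else if pyAnyIn ["technical", "clean", "presentation"] desc_lower then "architecture_technical"
    else "architecture_hero"
  else "product_studio_pro"

-- ===== PORT B =====
-- the whole keyword vocabulary (Source B's _KEYWORDS)
def pvKeywords : List String :=
  ["product", "ecommerce", "catalog", "item",
   "lifestyle", "natural", "contextual",
   "hero", "dramatic", "premium",
   "portrait", "character", "person", "face", "headshot",
   "noir", "black and white", "vintage",
   "cinematic", "moody", "artistic",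
   "landscape", "environment", "nature", "outdoor scene",
   "epic", "wide", "dramatic sky",
   "dark", "fog", "night",
   "architecture", "building", "structure", "interior",
   "dramatic night",
   "technical", "clean", "presentation"]

-- Source B's _RULES table
def pvRules : List (List String × List (List String × String) × String) :=
  [ (["product", "ecommerce", "catalog", "item"],
     [(["lifestyle", "natural", "contextual"], "product_lifestyle"),
      (["hero", "dramatic", "premium"], "product_hero_dramatic")],
     "product_studio_pro"),
    (["portrait", "character", "person", "face", "headshot"],
     [(["noir", "black and white", "vintage"], "portrait_noir"),
      (["cinematic", "dramatic", "moody", "artistic"], "portrait_cinematic")],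
     "portrait_professional"),
    (["landscape", "environment", "nature", "outdoor scene"],
     [(["epic", "wide", "dramatic sky"], "landscape_epic"),
      (["moody", "dark", "fog", "night"], "landscape_moody")],
     "landscape_classic"),
    (["architecture", "building", "structure", "interior"],
     [(["night", "dramatic night"], "architecture_dramatic"),
      (["technical", "clean", "presentation"], "architecture_technical")],
     "architecture_hero") ]

-- `{k for k in _KEYWORDS if k in desc}` — the feature set
def pvFound (desc : String) : PySem.Set String :=
  PySem.Set.ofList (pvKeywords.filter (fun k => PySem.Str.isIn k desc))

-- inner loop of `_classify`: first subrule not disjoint from the feature set, else the base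
def pvPickSub (found : PySem.Set String) : List (List String × String) → String → String
  | [], base => base
  | (sub, t) :: rest, base =>
      if !PySem.Set.isdisjoint found sub then t else pvPickSub found rest base

-- `_classify(found, rules)`: recursion over the rule table
def pvClassify (found : PySem.Set String) : List (List String × List (List String × String) × String) → String
  | [] => "product_studio_pro"
  | (top, subrules, base) :: rest =>
      if PySem.Set.isdisjoint found top then pvClassify found rest
      else pvPickSub found subrules base

def suggest_template_alt (scene_description : String) (object_type : Option String) (style : Option String) : String :=
  let desc := PySem.Str.lower scene_description
  pvClassify (pvFound desc) pvRules

-- ===== PRECONDITION & SPEC =====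
def Spec_suggest_template (scene_description : String) (object_type : Option String) (style : Option String) (out : String) : Prop := out = suggest_template_alt scene_description object_type style
instance (scene_description : String) (object_type : Option String) (style : Option String) (out : String) : Decidable (Spec_suggest_template scene_description object_type style out) := by unfold Spec_suggest_template; infer_instance

-- ===== CLAIM =====
def Claim_equal_suggest_template : Prop := ∀ (scene_description : String) (object_type : Option String) (style : Option String), Dom_suggest_template scene_description object_type style → Spec_suggest_template scene_description object_type style (suggest_template scene_description object_type style)

-- ===== LEMMAS AND PROOFS =====

-- membership in the feature set
lemma pvMem_found (desc : String) (k : String) :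
    k ∈ pvFound desc ↔ k ∈ pvKeywords ∧ PySem.Str.isIn k desc = true := by
  unfold pvFound
  rw [PySem.Set.mem_ofList, List.mem_filter]

-- a disjointness test against a keyword list is A's per-list substring search, negated
lemma pvDisj_eq (desc : String) (L : List String) (h : ∀ w ∈ L, w ∈ pvKeywords) :
    PySem.Set.isdisjoint (pvFound desc) L = !(L.any (fun w => PySem.Str.isIn w desc)) := by
  rw [Bool.eq_iff_iff, PySem.Set.isdisjoint_iff, Bool.not_eq_true', Bool.eq_false_iff]
  constructor
  · intro hd hany
    obtain ⟨w, hwL, hin⟩ := List.any_eq_true.mp hany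
    exact hd w ((pvMem_found desc w).mpr ⟨h w hwL, hin⟩) hwL
  · intro hd w hw hwL
    exact hd (List.any_eq_true.mpr ⟨w, hwL, ((pvMem_found desc w).mp hw).2⟩)

-- an `if` on a negated Bool flips its branches
lemma pvIteNot {α : Type} (b : Bool) (x y : α) :
    (if (!b) = true then x else y) = if b = true then y else x := by
  cases b <;> simp

-- ===== VERDICT =====
theorem suggest_template_spec : Claim_equal_suggest_template := by
  intro sd ot st _
  unfold Spec_suggest_template suggest_template suggest_template_alt
  simp only [pvRules, pvClassify, pvPickSub, pyAnyIn,
    pvDisj_eq _ ["product", "ecommerce", "catalog", "item"] (by decide),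
    pvDisj_eq _ ["lifestyle", "natural", "contextual"] (by decide),
    pvDisj_eq _ ["hero", "dramatic", "premium"] (by decide),
    pvDisj_eq _ ["portrait", "character", "person", "face", "headshot"] (by decide),
    pvDisj_eq _ ["noir", "black and white", "vintage"] (by decide),
    pvDisj_eq _ ["cinematic", "dramatic", "moody", "artistic"] (by decide),
    pvDisj_eq _ ["landscape", "environment", "nature", "outdoor scene"] (by decide),
    pvDisj_eq _ ["epic", "wide", "dramatic sky"] (by decide),
    pvDisj_eq _ ["moody", "dark", "fog", "night"] (by decide),
    pvDisj_eq _ ["architecture", "building", "structure", "interior"] (by decide),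
    pvDisj_eq _ ["night", "dramatic night"] (by decide),
    pvDisj_eq _ ["technical", "clean", "presentation"] (by decide),
    Bool.not_not, pvIteNot]
  rfl
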